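-- pv_equiv track=rewrite | github.com/jm1261/Fantasy-F1-League | Functions/Dictionary.py | team_points
-- ===== SOURCE A (Python) =====
-- def team_points(manager_dict,
--                 races):
--     '''
--     '''
--     season_points = []
--     for i in range(0, races):
--         weekly_points = []
--         for key, points in manager_dict:
--             for index, point in enumerate(points):
--                 if index == i:
--                     weekly_points.append(point)
--                 else:
--                     pass
--         season_points.append(sum(weekly_points))
--     return season_points
-- ===== SOURCE B (Python) =====
-- def team_points(manager_dict,
--                 races):
--     season_points = [0] * races
--     for key, points in manager_dict:
--         for index, point in enumerate(points):
--             if index < races: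
--                 season_points[index] += point
--     return season_points
-- ===== Notes on version B (the rewrite author's own statement) =====
-- stated objective: faster
-- what changed: Single pass over managers accumulating into a preallocated per-race table, instead of rescanning every manager's full points list once per race.
import Mathlib
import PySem

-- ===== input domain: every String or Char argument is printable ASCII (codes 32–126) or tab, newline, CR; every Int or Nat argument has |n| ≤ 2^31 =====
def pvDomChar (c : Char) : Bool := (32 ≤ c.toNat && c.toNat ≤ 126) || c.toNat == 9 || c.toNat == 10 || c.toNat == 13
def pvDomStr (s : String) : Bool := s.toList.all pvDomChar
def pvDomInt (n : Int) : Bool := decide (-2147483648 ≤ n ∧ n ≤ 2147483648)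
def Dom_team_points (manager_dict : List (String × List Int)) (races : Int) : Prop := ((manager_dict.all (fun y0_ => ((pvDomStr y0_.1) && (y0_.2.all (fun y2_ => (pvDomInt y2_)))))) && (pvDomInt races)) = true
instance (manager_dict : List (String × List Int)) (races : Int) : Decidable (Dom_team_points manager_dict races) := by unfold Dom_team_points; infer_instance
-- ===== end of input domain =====

-- B replaces A's races×managers rescan with one pass over managers accumulating into a per-race table (faster: O(races + total points) vs O(races · total points)).

-- ===== PORT A =====
-- literal port: for i in range(0, races): weekly = []; for key, points: for index, point in enumerate(points): if index == i: weekly.append(point); season.append(sum(weekly))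
def team_points (manager_dict : List (String × List Int)) (races : Int) : List Int :=
  (PySem.List.pyRange 0 races 1).foldl (fun season_points i =>
    let weekly_points : List Int :=
      manager_dict.foldl (fun w kp =>
        (PySem.List.enumerate kp.2 0).foldl (fun w2 ip =>
          if ip.1 = i then w2 ++ [ip.2] else w2) w) []
    season_points ++ [weekly_points.sum]) []

-- ===== PORT B =====
-- literal port of Source B: season = [0]*races; for each manager, for index, point in enumerate(points): if index < races: season[index] += point
def team_points_alt (manager_dict : List (String × List Int)) (races : Int) : List Int :=
  manager_dict.foldl (fun season kp =>
    (PySem.List.enumerate kp.2 0).foldl (fun s ip =>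
      if ip.1 < races then s.set ip.1.toNat (s.getD ip.1.toNat 0 + ip.2) else s) season)
    (List.replicate races.toNat 0)

-- ===== PRECONDITION & SPEC =====
def Spec_team_points (manager_dict : List (String × List Int)) (races : Int) (out : List Int) : Prop := out = team_points_alt manager_dict races
instance (manager_dict : List (String × List Int)) (races : Int) (out : List Int) : Decidable (Spec_team_points manager_dict races out) := by unfold Spec_team_points; infer_instance

-- ===== CLAIM (what is proved, stated in full; the proofs are below) =====
def Claim_equal_team_points : Prop := ∀ (manager_dict : List (String × List Int)) (races : Int), Dom_team_points manager_dict races → Spec_team_points manager_dict races (team_points manager_dict races)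

-- ===== LEMMAS AND PROOFS =====

-- the common reference value: per-race-index column sum over all managers
def colSum (md : List (String × List Int)) (n : Nat) : Int :=
  (md.map (fun kp => kp.2.getD n 0)).sum

-- which points of one manager match race index i (A's inner filter)
theorem enum_filter_eq (ps : List Int) (i : Int) : ∀ s : Int,
    ((PySem.List.enumerate ps s).filter (fun ip => decide (ip.1 = i))).map (·.2)
      = (if s ≤ i then (ps[(i - s).toNat]?).toList else []) := by
  induction ps with
  | nil => intro s; simp [PySem.List.enumerate_nil]
  | cons x xs ih =>
    intro s
    rw [PySem.List.enumerate_cons]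
    by_cases h : s = i
    · subst h
      have h1 : ¬ (s + 1 ≤ s) := by omega
      simp [ih (s + 1), h1]
    · by_cases h2 : s ≤ i
      · have h3 : s + 1 ≤ i := by omega
        have h4 : (i - s).toNat = (i - (s + 1)).toNat + 1 := by omega
        simp [ih (s + 1), h, h2, h3, h4]
      · have h3 : ¬ (s + 1 ≤ i) := by omega
        simp [ih (s + 1), h, h2, h3]

-- one Python inner loop 'if index == i: w.append(point)' as filter+map
theorem enumfold_eq (i : Int) (l : List (Int × Int)) : ∀ w : List Int,
    l.foldl (fun w2 ip => if ip.1 = i then w2 ++ [ip.2] else w2) w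
      = w ++ (l.filter (fun ip => decide (ip.1 = i))).map (·.2) := by
  induction l with
  | nil => intro w; simp
  | cons x l ih =>
    intro w
    by_cases h : x.1 = i
    · simp [h, ih]
    · simp [h, ih]

-- sum of a flatMap, pointwise
theorem sum_flatMap_eq {α : Type} (g : α → List Int) (h : α → Int)
    (hp : ∀ x, (g x).sum = h x) : ∀ md : List α, (md.flatMap g).sum = (md.map h).sum := by
  intro md
  induction md with
  | nil => simp
  | cons x md ih => simp [ih, hp x]

-- A's weekly fold over one manager's points, rewritten to append-of-filter
theorem inner_fold_A (i : Int) (md : List (String × List Int)) (w : List Int) :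
    md.foldl (fun w kp =>
        (PySem.List.enumerate kp.2 0).foldl (fun w2 ip =>
          if ip.1 = i then w2 ++ [ip.2] else w2) w) w
      = w ++ md.flatMap (fun kp =>
          ((PySem.List.enumerate kp.2 0).filter (fun ip => decide (ip.1 = i))).map (·.2)) := by
  induction md generalizing w with
  | nil => simp
  | cons kp md ih =>
    simp only [List.foldl_cons, List.flatMap_cons]
    rw [enumfold_eq, ih]
    simp

theorem weekly_sum_A (md : List (String × List Int)) (i : Int) (hi : 0 ≤ i) :
    (md.foldl (fun w kp =>
        (PySem.List.enumerate kp.2 0).foldl (fun w2 ip =>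
          if ip.1 = i then w2 ++ [ip.2] else w2) w) []).sum = colSum md i.toNat := by
  rw [inner_fold_A]
  simp only [List.nil_append, colSum]
  apply sum_flatMap_eq
  intro kp
  rw [enum_filter_eq kp.2 i 0]
  simp only [hi, if_pos, Int.sub_zero]
  cases h : kp.2[i.toNat]? with
  | none => simp [List.getD, h]
  | some v => simp [List.getD, h]

theorem team_points_eq_map (md : List (String × List Int)) (races : Int) :
    team_points md races = (List.range races.toNat).map (fun k => colSum md k) := by
  unfold team_points
  rw [PySem.List.foldl_append_singleton_eq_map]
  rw [PySem.List.pyRange_one]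
  simp only [Int.sub_zero, List.map_map]  -- pyRange 0 races 1 = (range races.toNat).map (0 + ·)
  apply List.map_congr_left
  intro k hk
  have : ((0 : Int) + (k : Int)) = (k : Int) := by omega
  rw [Function.comp_apply, this, weekly_sum_A md k (by positivity)]
  simp

-- B's inner loop over one manager's points, characterized elementwise
theorem row_B (races : Int) (ps : List Int) : ∀ (n : Nat) (s : List Int),
    (∀ j : Nat, ((j : Int) < races ↔ j < s.length)) →
    (PySem.List.enumerate ps (n : Int)).foldl (fun s ip =>
        if ip.1 < races then s.set ip.1.toNat (s.getD ip.1.toNat 0 + ip.2) else s) s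
      = (List.range s.length).map (fun j => s.getD j 0 + (if n ≤ j then ps.getD (j - n) 0 else 0)) := by
  induction ps with
  | nil =>
    intro n s hlen
    simp [PySem.List.enumerate_nil]
    apply (List.ext_getElem (by simp) ?_).symm
    intro j h1 h2
    simp at h1 ⊢
    rw [List.getElem?_eq_getElem h1]
    rfl
  | cons x xs ih =>
    intro n s hlen
    rw [PySem.List.enumerate_cons]
    simp only [List.foldl_cons]
    by_cases hg : (n : Int) < races
    · rw [if_pos hg]
      have hn : n < s.length := (hlen n).mp hg
      have h1 : ((n : Int)).toNat = n := by omega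
      rw [h1]
      have hlen' : ∀ j : Nat, ((j : Int) < races ↔ j < (s.set n (s.getD n 0 + x)).length) := by
        intro j; rw [List.length_set]; exact hlen j
      have h2 : ((n : Int) + 1) = ((n + 1 : Nat) : Int) := by omega
      rw [h2, ih (n + 1) _ hlen']
      apply List.ext_getElem (by simp)
      intro j hj1 hj2
      simp only [List.length_set] at hj1
      simp only [List.getElem_map, List.getElem_range, List.length_map, List.length_range] at hj1 hj2 ⊢
      by_cases hjn : j = n
      · subst hjn
        have e1 : ¬ (j + 1 ≤ j) := by omega
        rw [List.getD_eq_getElem _ 0 (by simpa using hj1), List.getElem_set_self,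
            List.getD_eq_getElem s 0 (by simpa using hj1)]
        simp [e1]
      · rw [List.getD_eq_getElem _ 0 (by simpa using hj1), List.getElem_set_ne (by omega),
            ← List.getD_eq_getElem s 0 (by simpa using hj1)]
        by_cases hle : n ≤ j
        · have e1 : n + 1 ≤ j := by omega
          have e2 : j - n = (j - (n + 1)) + 1 := by omega
          simp [hle, e1, e2]
        · have e1 : ¬ (n + 1 ≤ j) := by omega
          simp [hle, e1]
    · rw [if_neg hg]
      have h2 : ((n : Int) + 1) = ((n + 1 : Nat) : Int) := by omega
      rw [h2, ih (n + 1) _ hlen]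
      apply List.map_congr_left
      intro j hj
      simp only [List.mem_range] at hj
      have hn : ¬ (n ≤ j) := by
        intro hle
        exact hg (lt_of_le_of_lt (by exact_mod_cast hle) ((hlen j).mpr hj))
      have hn1 : ¬ (n + 1 ≤ j) := by omega
      simp [hn, hn1]

theorem outer_B (races : Int) (md : List (String × List Int)) : ∀ (s : List Int),
    (∀ j : Nat, ((j : Int) < races ↔ j < s.length)) →
    md.foldl (fun season kp =>
        (PySem.List.enumerate kp.2 0).foldl (fun s ip =>
          if ip.1 < races then s.set ip.1.toNat (s.getD ip.1.toNat 0 + ip.2) else s) season) s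
      = (List.range s.length).map (fun j => s.getD j 0 + colSum md j) := by
  induction md with
  | nil =>
    intro s hlen
    simp only [List.foldl_nil, colSum, List.map_nil, List.sum_nil]
    apply (List.ext_getElem (by simp) ?_).symm
    intro j h1 h2
    
    simp only [List.getElem_map, List.getElem_range, Int.add_zero]
    rw [List.getD_eq_getElem s 0 (by simpa using h2)]
  | cons kp md ih =>
    intro s hlen
    simp only [List.foldl_cons]
    have hrow := row_B races kp.2 0 s hlen
    rw [Nat.cast_zero] at hrow
    rw [hrow]
    have hlen' : ∀ j : Nat, ((j : Int) < races ↔ j < ((List.range s.length).map (fun j => s.getD j 0 + (if 0 ≤ j then kp.2.getD (j - 0) 0 else 0))).length) := by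
      intro j; simpa using hlen j
    rw [ih _ hlen']
    apply List.ext_getElem (by simp)
    intro j hj1 hj2
    simp only [List.length_map, List.length_range] at hj1 hj2
    simp only [List.getElem_map, List.getElem_range]
    rw [List.getD_eq_getElem _ 0 (by simpa using hj1)]
    simp only [List.getElem_map, List.getElem_range, Nat.zero_le, if_pos, Nat.sub_zero, colSum,
      List.map_cons, List.sum_cons]
    ring

theorem team_points_alt_eq_map (md : List (String × List Int)) (races : Int) :
    team_points_alt md races = (List.range races.toNat).map (fun k => colSum md k) := by
  unfold team_points_alt
  rw [outer_B races md (List.replicate races.toNat 0)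
      (by intro j; rw [List.length_replicate]; omega)]
  simp only [List.length_replicate]
  apply List.map_congr_left
  intro k hk
  simp only [List.mem_range] at hk
  rw [List.getD_eq_getElem _ 0 (by simpa using hk)]
  simp

-- ===== VERDICT (by name: the statement is the Claim_ definition above) =====
theorem team_points_spec : Claim_equal_team_points := by
  intro md races _
  unfold Spec_team_points
  rw [team_points_eq_map, team_points_alt_eq_map]
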